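-- pv_equiv track=rewrite | github.com/anntnzrb/agents | assets/skills/xml-surgeon/scripts/lib.py | find_start_tag_span
-- ===== SOURCE A (Python) =====
-- def find_start_tag_span(text: str, line_start: int, tag: str) -> tuple[int, int] | None:
--     needle = f"<{tag}"
--     start = text.find(needle, line_start)
--     if start == -1:
--         start = text.find("<", line_start)
--     if start == -1:
--         return None
--     in_quote = None
--     i = start
--     while i < len(text):
--         ch = text[i]
--         if ch in "\"'":
--             if in_quote is None:
--                 in_quote = ch
--             elif in_quote == ch:
--                 in_quote = None
--         elif ch == ">" and in_quote is None:
--             return start, i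
--         i += 1
--     return None
-- ===== SOURCE B (Python) =====
-- def _min_find(text, i):
--     j = text.find('>', i)
--     for q in ('"', "'"):
--         p = text.find(q, i)
--         if p != -1 and (j == -1 or p < j):
--             j = p
--     return j
--
--
-- def find_start_tag_span(text: str, line_start: int, tag: str) -> tuple[int, int] | None:
--     needle = "<" + tag
--     start = text.find(needle, line_start)
--     if start == -1:
--         start = text.find("<", line_start)
--     if start == -1:
--         return None
--     i = start
--     while True:
--         j = _min_find(text, i)
--         if j == -1:
--             return None
--         c = text[j]
--         if c == '>':
--             return start, j
--         m = text.find(c, j + 1)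
--         if m == -1:
--             return None
--         i = m + 1
-- ===== Notes on version B (the rewrite author's own statement) =====
-- stated objective: alternative
-- what changed: The char-by-char quote-tracking while loop is replaced by a find-driven scan that jumps to the earliest of '>'/'"'/'\'' via str.find and skips each quoted region in one find call for its matching quote.
import Mathlib
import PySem

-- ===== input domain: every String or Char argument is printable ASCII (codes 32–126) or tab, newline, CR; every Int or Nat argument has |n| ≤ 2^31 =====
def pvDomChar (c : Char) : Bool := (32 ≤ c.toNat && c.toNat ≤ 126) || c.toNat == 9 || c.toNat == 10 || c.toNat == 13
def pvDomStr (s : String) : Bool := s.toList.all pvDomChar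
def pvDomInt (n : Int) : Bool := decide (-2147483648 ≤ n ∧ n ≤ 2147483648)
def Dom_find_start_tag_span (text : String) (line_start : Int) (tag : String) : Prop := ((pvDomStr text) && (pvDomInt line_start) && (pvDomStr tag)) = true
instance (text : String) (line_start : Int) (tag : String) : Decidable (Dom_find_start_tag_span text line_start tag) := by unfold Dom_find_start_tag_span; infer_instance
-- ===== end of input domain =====

-- B replaces A's char-by-char quote-tracking scan by a find-driven scan that jumps from
-- special character to special character (objective: alternative decomposition; same result).

-- ===== PORT A =====
-- A's while loop: i scans the suffix of text starting at `start`, tracking in_quote.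
-- `ch in "\"'"` on a single char is exactly (c = '"' ∨ c = '\'').
def pvLoopA : List Char → Nat → Option Char → Option Nat
  | [], _, _ => none
  | c :: rest, i, q =>
    if c = '"' ∨ c = '\'' then
      match q with
      | none => pvLoopA rest (i + 1) (some c)
      | some qc => if qc = c then pvLoopA rest (i + 1) none else pvLoopA rest (i + 1) (some qc)
    else if c = '>' ∧ q = none then some i
    else pvLoopA rest (i + 1) q

def find_start_tag_span (text : String) (line_start : Int) (tag : String) : Option (Int × Int) :=
  let needle := "<" ++ tag
  let start0 := PySem.Str.findFrom text needle line_start none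
  let start := if start0 = -1 then PySem.Str.findFrom text "<" line_start none else start0
  if start = -1 then none
  else
    match pvLoopA (text.toList.drop start.toNat) start.toNat none with
    | some i => some (start, (i : Int))
    | none => none

-- ===== PORT B =====
-- Source B's _min_find: earliest index ≥ i of '>', '"' or '\'' (-1 if none); the for over ('"', "'") is unrolled.
def pvMinFind (tl : List Char) (i : Nat) : Int :=
  let j0 := PySem.Chars.findFrom tl ['>'] (i : Int) none
  let p1 := PySem.Chars.findFrom tl ['"'] (i : Int) none
  let j1 := if p1 ≠ -1 ∧ (j0 = -1 ∨ p1 < j0) then p1 else j0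
  let p2 := PySem.Chars.findFrom tl ['\''] (i : Int) none
  if p2 ≠ -1 ∧ (j1 = -1 ∨ p2 < j1) then p2 else j1

-- Source B's main loop, driven by find jumps. The scan index strictly grows, so fuel = len+1
-- is a pure totality guard (never exhausted on the call below, as the equivalence proof shows).
def pvLoopB (tl : List Char) (fuel : Nat) (i : Nat) : Option Nat :=
  match fuel with
  | 0 => none
  | fuel + 1 =>
    let j := pvMinFind tl i
    if j = -1 then none
    else
      match tl[j.toNat]? with
      | none => none  -- unreachable: j ≠ -1 is a valid index
      | some c =>
        if c = '>' then some j.toNat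
        else
          let m := PySem.Chars.findFrom tl [c] ((j.toNat + 1 : Nat) : Int) none
          if m = -1 then none
          else pvLoopB tl fuel (m.toNat + 1)

def find_start_tag_span_alt (text : String) (line_start : Int) (tag : String) : Option (Int × Int) :=
  let needle := "<" ++ tag
  let start0 := PySem.Str.findFrom text needle line_start none
  let start := if start0 = -1 then PySem.Str.findFrom text "<" line_start none else start0
  if start = -1 then none
  else
    match pvLoopB text.toList (text.toList.length + 1) start.toNat with
    | some j => some (start, (j : Int))
    | none => none

-- ===== PRECONDITION & SPEC =====
def Spec_find_start_tag_span (text : String) (line_start : Int) (tag : String) (out : Option (Int × Int)) : Prop := out = find_start_tag_span_alt text line_start tag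
instance (text : String) (line_start : Int) (tag : String) (out : Option (Int × Int)) : Decidable (Spec_find_start_tag_span text line_start tag out) := by unfold Spec_find_start_tag_span; infer_instance

-- ===== CLAIM (what is proved, stated in full; the proofs are below) =====
def Claim_equal_find_start_tag_span : Prop := ∀ (text : String) (line_start : Int) (tag : String), Dom_find_start_tag_span text line_start tag → Spec_find_start_tag_span text line_start tag (find_start_tag_span text line_start tag)

-- ===== LEMMAS AND PROOFS =====

-- bounds on the find-driven jumps, used throughout the equivalence proof
theorem pvFindFrom_bounds (s sub : List Char) (st : Int) :
    PySem.Chars.findFrom s sub st none ≠ -1 →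
      0 ≤ PySem.Chars.findFrom s sub st none ∧ PySem.Chars.findFrom s sub st none ≤ s.length := by
  have hle := PySem.Chars.find_le_length (List.drop (if st < 0 then (if st + s.length < 0 then 0 else st + s.length) else st).toNat (List.take ((s.length : Int)).toNat s)) sub
  have hge := PySem.Chars.neg_one_le_find (List.drop (if st < 0 then (if st + s.length < 0 then 0 else st + s.length) else st).toNat (List.take ((s.length : Int)).toNat s)) sub
  simp only [PySem.Chars.findFrom] at *
  split_ifs at * <;> simp_all <;> omega

theorem pvFindFrom_ge (s sub : List Char) (k : Nat) :
    PySem.Chars.findFrom s sub (k : Int) none ≠ -1 →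
      (k : Int) ≤ PySem.Chars.findFrom s sub (k : Int) none := by
  have hge := PySem.Chars.neg_one_le_find (List.drop ((k : Int)).toNat (List.take ((s.length : Int)).toNat s)) sub
  simp only [PySem.Chars.findFrom]
  split_ifs with h1 h2 h3 <;> simp_all <;> omega

theorem pvMinFind_bounds (tl : List Char) (i : Nat) :
    pvMinFind tl i ≠ -1 → (i : Int) ≤ pvMinFind tl i ∧ pvMinFind tl i ≤ tl.length := by
  dsimp only [pvMinFind]
  have h0 := pvFindFrom_ge tl ['>'] i
  have h1 := pvFindFrom_ge tl ['"'] i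
  have h2 := pvFindFrom_ge tl ['\''] i
  have b0 := pvFindFrom_bounds tl ['>'] (i : Int)
  have b1 := pvFindFrom_bounds tl ['"'] (i : Int)
  have b2 := pvFindFrom_bounds tl ['\''] (i : Int)
  split_ifs <;> intro h <;> constructor <;> omega

-- the special characters A's scan reacts to outside quotes
def pvP (c : Char) : Bool := c == '>' || c == '"' || c == '\''

-- encode Python's -1 convention
def pvEnc : Option Nat → Int
  | none => -1
  | some n => (n : Int)

theorem pvLoopA_skip_none (u l : List Char) (k : Nat) (h : ∀ c ∈ u, pvP c = false) :
    pvLoopA (u ++ l) k none = pvLoopA l (k + u.length) none := by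
  induction u generalizing k with
  | nil => simp
  | cons c u ih =>
    have hc := h c (by simp)
    simp only [pvP, Bool.or_eq_false_iff, beq_eq_false_iff_ne, ne_eq] at hc
    simp only [List.cons_append, pvLoopA]
    rw [if_neg (by tauto), if_neg (by tauto), ih (k + 1) (fun c hc => h c (by simp [hc]))]
    have h2 : k + 1 + u.length = k + (c :: u).length := by simp; omega
    rw [h2]

theorem pvLoopA_skip_quote (u l : List Char) (k : Nat) (q : Char)
    (h : ∀ c ∈ u, c ≠ q) :
    pvLoopA (u ++ l) k (some q) = pvLoopA l (k + u.length) (some q) := by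
  induction u generalizing k with
  | nil => simp
  | cons c u ih =>
    have hc := h c (by simp)
    simp only [List.cons_append, pvLoopA]
    have step : pvLoopA (u ++ l) (k + 1) (some q) = pvLoopA l (k + 1 + u.length) (some q) :=
      ih (k + 1) (fun c hc => h c (by simp [hc]))
    by_cases hcc : c = '"' ∨ c = '\''
    · rw [if_pos hcc]
      rw [if_neg (show ¬ q = c from fun hh => hc hh.symm), step]
      have h2 : k + 1 + u.length = k + (c :: u).length := by simp; omega
      rw [h2]
    · rw [if_neg hcc, if_neg (by rintro ⟨_, h⟩; cases h), step]
      have h2 : k + 1 + u.length = k + (c :: u).length := by simp; omega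
      rw [h2]

theorem pvFind_single (d : List Char) (c : Char) :
    PySem.Chars.find d [c] = pvEnc (d.findIdx? (· == c)) := by
  have hsingle_infix : ([c] <:+: d) ↔ c ∈ d := by
    constructor
    · intro h; exact h.subset (by simp)
    · intro h; obtain ⟨s, t, rfl⟩ := List.append_of_mem h
      exact ⟨s, t, by simp⟩
  have hsingle_prefix : ∀ (l : List Char), ([c] <+: l) ↔ l.head? = some c := by
    intro l; cases l with
    | nil => simp
    | cons x xs =>
      constructor
      · rintro ⟨t, ht⟩; simp at ht; simp [ht.1]
      · intro h; simp at h; exact ⟨xs, by simp [h]⟩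
  cases hf : d.findIdx? (· == c) with
  | none =>
    rw [List.findIdx?_eq_none_iff] at hf
    have : c ∉ d := fun hm => by simpa using hf c hm
    simp [pvEnc, (PySem.Chars.find_eq_neg_one_iff d [c]).2 (fun h => this (hsingle_infix.1 h))]
  | some n =>
    rw [List.findIdx?_eq_some_iff_getElem] at hf
    obtain ⟨hn, hcn, hmin⟩ := hf
    have hdn : d[n] = c := by simpa using hcn
    have hmem : c ∈ d := by rw [← hdn]; exact List.getElem_mem hn
    have hpos : 0 ≤ PySem.Chars.find d [c] :=
      (PySem.Chars.find_nonneg_iff d [c]).2 (hsingle_infix.2 hmem)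
    obtain ⟨hpref, hminf⟩ := PySem.Chars.find_spec (s := d) (sub := [c]) hpos
    have hat : ∀ j : Nat, ([c] <+: d.drop j) ↔ d[j]? = some c := fun j => by
      rw [hsingle_prefix, List.head?_drop]
    have h1 : d[(PySem.Chars.find d [c]).toNat]? = some c := (hat _).1 hpref
    have h2 : (PySem.Chars.find d [c]).toNat = n := by
      rcases Nat.lt_trichotomy (PySem.Chars.find d [c]).toNat n with h | h | h
      · obtain ⟨hlt2, heq⟩ := List.getElem?_eq_some_iff.mp h1
        exact absurd (show (d[(PySem.Chars.find d [c]).toNat]'hlt2 == c) = true by simp [heq]) (hmin _ h)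
      · exact h
      · exact absurd ((hat n).2 (by rw [List.getElem?_eq_getElem hn, hdn])) (hminf n h)
    simp [pvEnc, ← h2, Int.toNat_of_nonneg hpos]

def pvOmin : Option Nat → Option Nat → Option Nat
  | none, b => b
  | some n, none => some n
  | some n, some m => some (min n m)

theorem pvOmin_left_zero (b : Option Nat) : pvOmin (some 0) b = some 0 := by
  cases b <;> simp [pvOmin]

theorem pvOmin_right_zero (a : Option Nat) : pvOmin a (some 0) = some 0 := by
  cases a <;> simp [pvOmin]

theorem pvOmin_map (a b : Option Nat) :
    pvOmin (a.map (· + 1)) (b.map (· + 1)) = (pvOmin a b).map (· + 1) := by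
  cases a <;> cases b <;> simp [pvOmin] <;> omega

theorem pvOmin3_findIdx (d : List Char) :
    pvOmin (pvOmin (d.findIdx? (· == '>')) (d.findIdx? (· == '"'))) (d.findIdx? (· == '\'')) =
      d.findIdx? pvP := by
  induction d with
  | nil => simp [pvOmin]
  | cons c d ih =>
    simp only [List.findIdx?_cons]
    cases hg : (c == '>') <;> cases h1 : (c == '"') <;> cases h2 : (c == '\'') <;>
      simp [pvP, hg, h1, h2, pvOmin_left_zero, pvOmin_right_zero, pvOmin_map, ih]

theorem pvMinFind_eq (tl : List Char) (i : Nat) (h : i ≤ tl.length) :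
    pvMinFind tl i = pvEnc (((tl.drop i).findIdx? pvP).map (i + ·)) := by
  dsimp only [pvMinFind]
  rw [PySem.Chars.findFrom_natCast tl ['>'] i h,
      PySem.Chars.findFrom_natCast tl ['"'] i h,
      PySem.Chars.findFrom_natCast tl ['\''] i h,
      pvFind_single, pvFind_single, pvFind_single, ← pvOmin3_findIdx]
  cases ha : (tl.drop i).findIdx? (· == '>') <;>
  cases hb : (tl.drop i).findIdx? (· == '"') <;>
  cases hc : (tl.drop i).findIdx? (· == '\'') <;>
    simp [pvEnc, pvOmin] <;> (try split_ifs) <;> omega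

theorem pvLoopA_none_none (d : List Char) (k : Nat) (hfi : d.findIdx? pvP = none) :
    pvLoopA d k none = none := by
  simpa using pvLoopA_skip_none d [] k (List.findIdx?_eq_none_iff.mp hfi)

theorem pvLoopA_at_findIdx (d : List Char) (k n : Nat) (hfi : d.findIdx? pvP = some n) :
    pvLoopA d k none = pvLoopA (List.drop n d) (k + n) none := by
  obtain ⟨hn, hpn, hmin⟩ := List.findIdx?_eq_some_iff_getElem.mp hfi
  have hnotake : ∀ c ∈ d.take n, pvP c = false := by
    intro c hcmem
    obtain ⟨j, hm, rfl⟩ := List.mem_take_iff_getElem.mp hcmem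
    exact Bool.eq_false_iff.mpr (hmin j (by omega))
  calc pvLoopA d k none = pvLoopA (d.take n ++ d.drop n) k none := by rw [List.take_append_drop]
    _ = pvLoopA (d.drop n) (k + (d.take n).length) none := pvLoopA_skip_none _ _ _ hnotake
    _ = pvLoopA (d.drop n) (k + n) none := by rw [List.length_take]; congr 2; omega

theorem pvLoopA_enter (rest : List Char) (k : Nat) (qc : Char) (hq : qc = '"' ∨ qc = '\'') :
    pvLoopA (qc :: rest) k none = pvLoopA rest (k + 1) (some qc) := by
  simp only [pvLoopA, if_pos hq]

theorem pvLoopA_quote_none (v : List Char) (k : Nat) (q : Char)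
    (hfi : v.findIdx? (· == q) = none) :
    pvLoopA v k (some q) = none := by
  have hne : ∀ c ∈ v, c ≠ q := fun c hc => by
    simpa using List.findIdx?_eq_none_iff.mp hfi c hc
  simpa using pvLoopA_skip_quote v [] k q hne

theorem pvLoopA_quote_at (v : List Char) (k : Nat) (q : Char) (n2 : Nat)
    (hq : q = '"' ∨ q = '\'') (hfi : v.findIdx? (· == q) = some n2) :
    pvLoopA v k (some q) = pvLoopA (v.drop (n2 + 1)) (k + n2 + 1) none := by
  obtain ⟨hn, hpn, hmin⟩ := List.findIdx?_eq_some_iff_getElem.mp hfi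
  have hvq : v[n2] = q := by simpa using hpn
  have hnotake : ∀ c ∈ v.take n2, c ≠ q := by
    intro c hcmem
    obtain ⟨j, hm, rfl⟩ := List.mem_take_iff_getElem.mp hcmem
    have := hmin j (by omega); simpa using this
  have h1 : pvLoopA v k (some q) = pvLoopA (v.drop n2) (k + n2) (some q) := by
    calc pvLoopA v k (some q) = pvLoopA (v.take n2 ++ v.drop n2) k (some q) := by
          rw [List.take_append_drop]
      _ = pvLoopA (v.drop n2) (k + (v.take n2).length) (some q) :=
          pvLoopA_skip_quote _ _ _ _ hnotake
      _ = pvLoopA (v.drop n2) (k + n2) (some q) := by rw [List.length_take]; congr 2; omega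
  rw [h1, List.drop_eq_getElem_cons hn, hvq]
  simp only [pvLoopA, if_pos hq]
  simp

theorem pvLoopB_eq (tl : List Char) : ∀ (fuel i : Nat), tl.length < i + fuel →
    pvLoopB tl fuel i = pvLoopA (List.drop i tl) i none := by
  intro fuel
  induction fuel with
  | zero => intro i h; rw [List.drop_eq_nil_of_le (by omega)]; rfl
  | succ fuel ihf =>
    intro x h
    by_cases hj' : pvMinFind tl x = -1
    · simp only [pvLoopB]
      rw [if_pos hj']
      by_cases hle : x ≤ tl.length
      · have hmf := pvMinFind_eq tl x hle
        rw [hj'] at hmf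
        cases hfi : (tl.drop x).findIdx? pvP with
        | none => rw [pvLoopA_none_none _ _ hfi]
        | some n => exfalso; rw [hfi] at hmf; simp [pvEnc] at hmf; omega
      · rw [List.drop_eq_nil_of_le (by omega)]; rfl
    · have hbd := pvMinFind_bounds tl x hj'
      have hle : x ≤ tl.length := by omega
      have hmf := pvMinFind_eq tl x hle
      cases hfi : (tl.drop x).findIdx? pvP with
      | none => exact absurd (by rw [hfi] at hmf; simpa [pvEnc] using hmf) hj'
      | some n =>
        rw [hfi] at hmf
        have htn : (pvMinFind tl x).toNat = x + n := by rw [hmf]; simp [pvEnc]; omega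
        obtain ⟨hn, hpn, hmin⟩ := List.findIdx?_eq_some_iff_getElem.mp hfi
        have hlen : x + n < tl.length := by simp [List.length_drop] at hn; omega
        have hsome : tl[(pvMinFind tl x).toNat]? = some (tl[x + n]'hlen) := by
          rw [htn]; exact List.getElem?_eq_getElem hlen
        have hpq : pvP (tl[x + n]'hlen) = true := by
          have h2 := hpn; rwa [List.getElem_drop] at h2
        simp only [pvLoopB]
        rw [if_neg hj']
        simp only [hsome]
        by_cases hgt : tl[x + n]'hlen = '>'
        · rw [if_pos hgt, htn, pvLoopA_at_findIdx _ x n hfi, List.drop_drop,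
              List.drop_eq_getElem_cons hlen, hgt]
          simp [pvLoopA]
        · rw [if_neg hgt]
          have hq : tl[x + n]'hlen = '"' ∨ tl[x + n]'hlen = '\'' := by
            have h2 := hpq; simp [pvP, hgt] at h2; exact h2
          have e1 : PySem.Chars.findFrom tl [tl[x + n]'hlen] (((pvMinFind tl x).toNat + 1 : Nat) : Int) none
              = (if pvEnc ((tl.drop (x + n + 1)).findIdx? (· == tl[x + n]'hlen)) = -1 then -1
                 else ((x + n + 1 : Nat) : Int) + pvEnc ((tl.drop (x + n + 1)).findIdx? (· == tl[x + n]'hlen))) := by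
            rw [htn, PySem.Chars.findFrom_natCast tl _ (x + n + 1) (by omega), pvFind_single]
          cases hfq : (tl.drop (x + n + 1)).findIdx? (· == tl[x + n]'hlen) with
          | none =>
            have hm1 : PySem.Chars.findFrom tl [tl[x + n]'hlen] (((pvMinFind tl x).toNat + 1 : Nat) : Int) none = -1 := by
              rw [e1, hfq]; simp [pvEnc]
            rw [if_pos hm1, pvLoopA_at_findIdx _ x n hfi, List.drop_drop,
                List.drop_eq_getElem_cons hlen, pvLoopA_enter _ _ _ hq, pvLoopA_quote_none _ _ _ hfq]
          | some n2 =>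
            have hmv : PySem.Chars.findFrom tl [tl[x + n]'hlen] (((pvMinFind tl x).toNat + 1 : Nat) : Int) none
                = ((x + n + 1 + n2 : Nat) : Int) := by
              rw [e1, hfq]; simp [pvEnc]
            have hm1 : ¬ PySem.Chars.findFrom tl [tl[x + n]'hlen] (((pvMinFind tl x).toNat + 1 : Nat) : Int) none = -1 := by
              rw [hmv]; omega
            have hmtn : (PySem.Chars.findFrom tl [tl[x + n]'hlen] (((pvMinFind tl x).toNat + 1 : Nat) : Int) none).toNat
                = x + n + 1 + n2 := by rw [hmv]; omega
            rw [if_neg hm1, hmtn, ihf (x + n + 1 + n2 + 1) (by omega),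
                pvLoopA_at_findIdx _ x n hfi, List.drop_drop, List.drop_eq_getElem_cons hlen,
                pvLoopA_enter _ _ _ hq, pvLoopA_quote_at _ _ _ _ hq hfq, List.drop_drop]
            have hidx : x + n + 1 + (n2 + 1) = x + n + 1 + n2 + 1 := by omega
            rw [hidx]

-- ===== VERDICT (by name: the statement is the Claim_ definition above) =====
theorem find_start_tag_span_spec : Claim_equal_find_start_tag_span := by
  intro text line_start tag _
  unfold Spec_find_start_tag_span find_start_tag_span find_start_tag_span_alt
  dsimp only
  rw [pvLoopB_eq text.toList _ _ (by omega)]
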